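-- pv_equiv track=rewrite | github.com/saherhanif/python-practices | python practices/untitled21.py | is_extreme
-- ===== SOURCE A (Python) =====
-- def is_extreme(x):
--     y=[]
--     c=[]
--     for i in range(len(x)):
--         for j in range(len(x[i])):
--             if (i == j):
--                y.append(x[i][j])
--     for i in range(len(x)):
--         for j in range(len(x[i])):
--             if ((i + j) == (len(x) - 1)):
--                 c.append(x[i][j])
--
--     count = 0
--     for i in range(len(c)):
--         if y[i] <= c[i]:
--             count += 1
--
--     if count == len(y):
--         return True
--     else:
--         return False
-- ===== SOURCE B (Python) =====
-- def is_extreme(x):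
--     n = len(x)
--     y = [row[i] for i, row in enumerate(x) if i < len(row)]
--     c = [row[n - 1 - i] for i, row in enumerate(x) if 0 <= n - 1 - i < len(row)]
--     return len(y) == len(c) and all(a <= b for a, b in zip(y, c))
-- ===== Notes on version B (the rewrite author's own statement) =====
-- stated objective: faster
-- what changed: Replaces A's two full nested scans over every cell (collecting diagonals by testing each (i,j)) with direct per-row indexing of the two diagonal entries, and A's counting loop with a length check plus zip/all.
import Mathlib
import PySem

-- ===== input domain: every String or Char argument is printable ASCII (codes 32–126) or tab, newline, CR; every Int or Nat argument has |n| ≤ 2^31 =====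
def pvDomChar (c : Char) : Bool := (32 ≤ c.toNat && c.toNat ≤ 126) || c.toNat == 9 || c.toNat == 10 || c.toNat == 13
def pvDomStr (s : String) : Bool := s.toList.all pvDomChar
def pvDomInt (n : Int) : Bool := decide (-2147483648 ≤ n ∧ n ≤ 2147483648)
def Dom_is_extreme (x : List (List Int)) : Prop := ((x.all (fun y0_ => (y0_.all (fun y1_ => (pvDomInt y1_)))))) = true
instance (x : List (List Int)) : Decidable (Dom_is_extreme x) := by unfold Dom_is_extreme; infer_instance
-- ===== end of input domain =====

-- B replaces A's two whole-matrix nested scans by direct per-row indexing of the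
-- two diagonal entries and a zip/all comparison (asymptotically faster on wide rows).

-- ===== PORT A =====
-- A-side helpers: the two collecting double loops and the counting loop, verbatim
def pyA_y (x : List (List Int)) : List Int :=
  (PySem.List.pyRange 0 x.length 1).foldl (fun acc i =>
    let row := PySem.List.pyGetD x i []
    (PySem.List.pyRange 0 row.length 1).foldl (fun acc2 j =>
      if i == j then acc2 ++ [PySem.List.pyGetD row j 0] else acc2) acc) []

def pyA_c (x : List (List Int)) : List Int :=
  (PySem.List.pyRange 0 x.length 1).foldl (fun acc i =>
    let row := PySem.List.pyGetD x i []
    (PySem.List.pyRange 0 row.length 1).foldl (fun acc2 j =>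
      if i + j == (x.length : Int) - 1 then acc2 ++ [PySem.List.pyGetD row j 0] else acc2) acc) []

-- y[i] in the counting loop is where Python raises IndexError when len(c) > len(y); Pre_ excludes that
def is_extreme (x : List (List Int)) : Bool :=
  let y := pyA_y x
  let c := pyA_c x
  let count : Int :=
    (PySem.List.pyRange 0 c.length 1).foldl (fun cnt i =>
      if PySem.List.pyGetD y i 0 ≤ PySem.List.pyGetD c i 0 then cnt + 1 else cnt) 0
  if count == (y.length : Int) then true else false

-- ===== PORT B =====
-- B-side helpers: the two comprehensions over enumerate(x), verbatim
def pyB_y (x : List (List Int)) : List Int :=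
  (PySem.List.enumerate x).filterMap (fun p =>
    if p.1 < (p.2.length : Int) then some (PySem.List.pyGetD p.2 p.1 0) else none)

def pyB_c (x : List (List Int)) : List Int :=
  (PySem.List.enumerate x).filterMap (fun p =>
    if 0 ≤ (x.length : Int) - 1 - p.1 ∧ (x.length : Int) - 1 - p.1 < (p.2.length : Int)
    then some (PySem.List.pyGetD p.2 ((x.length : Int) - 1 - p.1) 0) else none)

def is_extreme_alt (x : List (List Int)) : Bool :=
  let y := pyB_y x
  let c := pyB_c x
  decide (y.length = c.length) && (y.zip c).all (fun p => decide (p.1 ≤ p.2))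

-- ===== PRECONDITION & SPEC =====
-- Pre_ excludes exactly the inputs where A raises IndexError: ragged matrices on which the
-- anti-diagonal hits strictly more rows than the main diagonal (len(c) > len(y) in A).
def Pre_is_extreme (x : List (List Int)) : Prop :=
  (List.range x.length).countP (fun i => decide (x.length - 1 - i < (x.getD i []).length)) ≤
  (List.range x.length).countP (fun i => decide (i < (x.getD i []).length))
instance (x : List (List Int)) : Decidable (Pre_is_extreme x) := by unfold Pre_is_extreme; infer_instance
def pvWitness_is_extreme : List (List Int) := [[1, 2], [3, 4]]

def Spec_is_extreme (x : List (List Int)) (out : Bool) : Prop := out = is_extreme_alt x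
instance (x : List (List Int)) (out : Bool) : Decidable (Spec_is_extreme x out) := by unfold Spec_is_extreme; infer_instance

-- ===== CLAIM (what is proved, stated in full; the proofs are below) =====
def Claim_equal_is_extreme : Prop := ∀ (x : List (List Int)), Dom_is_extreme x → Pre_is_extreme x → Spec_is_extreme x (is_extreme x)

-- ===== LEMMAS AND PROOFS =====

-- canonical form of the two diagonal lists, shared target of both ports
def pvCanonY (x : List (List Int)) : List Int :=
  (List.range x.length).flatMap (fun k =>
    if k < (x.getD k []).length then [(x.getD k []).getD k 0] else [])

def pvCanonC (x : List (List Int)) : List Int :=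
  (List.range x.length).flatMap (fun k =>
    if x.length - 1 - k < (x.getD k []).length then [(x.getD k []).getD (x.length - 1 - k) 0] else [])

-- a 0/1 flatMap of singletons has countP length
lemma pv_sum_map_ite (l : List Nat) (p : Nat → Bool) :
    (l.map (fun a => if p a then 1 else 0)).sum = l.countP p := by
  induction l with
  | nil => rfl
  | cons a t ih => by_cases h : p a <;> simp [h, ih, Nat.add_comm]

lemma pv_length_flatMap_ite {α : Type} (l : List Nat) (p : Nat → Prop) [DecidablePred p] (f : Nat → α) :
    (l.flatMap (fun k => if p k then [f k] else [])).length = l.countP (fun k => decide (p k)) := by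
  rw [List.length_flatMap, ← pv_sum_map_ite l (fun k => decide (p k))]
  congr 1
  apply List.map_congr_left
  intro a _
  by_cases h : p a <;> simp [h]

lemma pv_length_canonY (x : List (List Int)) :
    (pvCanonY x).length = (List.range x.length).countP (fun i => decide (i < (x.getD i []).length)) := by
  unfold pvCanonY; rw [pv_length_flatMap_ite]

lemma pv_length_canonC (x : List (List Int)) :
    (pvCanonC x).length = (List.range x.length).countP (fun i => decide (x.length - 1 - i < (x.getD i []).length)) := by
  unfold pvCanonC; rw [pv_length_flatMap_ite]

-- filter of an integer range by an equality test keeps at most the one matching index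
lemma pv_filter_range_eq (a b t : Int) :
    (PySem.List.pyRange a b 1).filter (fun j => j == t) = if a ≤ t ∧ t < b then [t] else [] := by
  rw [List.filter_beq, (PySem.List.nodup_pyRange_one a b).count]
  by_cases h : t ∈ PySem.List.pyRange a b 1
  · rw [PySem.List.mem_pyRange_one] at h; simp [h, PySem.List.mem_pyRange_one]
  · rw [PySem.List.mem_pyRange_one] at h; simp [h, PySem.List.mem_pyRange_one]

-- A's y-collecting double loop computes the canonical main diagonal
lemma pyA_y_eq (x : List (List Int)) : pyA_y x = pvCanonY x := by
  unfold pyA_y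
  have hstep : ∀ (acc : List Int), ∀ i ∈ PySem.List.pyRange 0 (x.length : Int) 1,
      (PySem.List.pyRange 0 ((PySem.List.pyGetD x i []).length : Int) 1).foldl (fun acc2 j =>
        if i == j then acc2 ++ [PySem.List.pyGetD (PySem.List.pyGetD x i []) j 0] else acc2) acc
      = acc ++ (if 0 ≤ i ∧ i < ((PySem.List.pyGetD x i []).length : Int)
                then [PySem.List.pyGetD (PySem.List.pyGetD x i []) i 0] else []) := by
    intro acc i _
    have hp : (fun j : Int => i == j) = (fun j : Int => j == i) := by
      funext j
      by_cases h : i = j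
      · simp [h]
      · rw [beq_eq_false_iff_ne.mpr h, beq_eq_false_iff_ne.mpr (Ne.symm h)]
    calc (PySem.List.pyRange 0 ((PySem.List.pyGetD x i []).length : Int) 1).foldl (fun acc2 j =>
          if i == j then acc2 ++ [PySem.List.pyGetD (PySem.List.pyGetD x i []) j 0] else acc2) acc
        = acc ++ ((PySem.List.pyRange 0 ((PySem.List.pyGetD x i []).length : Int) 1).filter
            (fun j : Int => i == j)).map (fun j => PySem.List.pyGetD (PySem.List.pyGetD x i []) j 0) :=
          PySem.List.foldl_append_if _ _ _ _
      _ = _ := by rw [hp, pv_filter_range_eq]; split <;> simp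
  rw [PySem.List.foldl_congr_mem _ _ _ _ hstep, PySem.List.foldl_append_eq_flatMap, List.nil_append,
      PySem.List.pyRange_one]
  simp only [Int.sub_zero, Int.toNat_natCast, List.flatMap_map]
  unfold pvCanonY
  rw [List.flatMap_def, List.flatMap_def]
  apply congrArg List.flatten
  apply List.map_congr_left
  intro k hk
  rw [List.mem_range] at hk
  simp [PySem.List.pyGetD_natCast]

-- A's c-collecting double loop computes the canonical anti-diagonal
lemma pyA_c_eq (x : List (List Int)) : pyA_c x = pvCanonC x := by
  unfold pyA_c
  have hstep : ∀ (acc : List Int), ∀ i ∈ PySem.List.pyRange 0 (x.length : Int) 1,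
      (PySem.List.pyRange 0 ((PySem.List.pyGetD x i []).length : Int) 1).foldl (fun acc2 j =>
        if i + j == (x.length : Int) - 1 then acc2 ++ [PySem.List.pyGetD (PySem.List.pyGetD x i []) j 0] else acc2) acc
      = acc ++ (if 0 ≤ (x.length : Int) - 1 - i ∧ (x.length : Int) - 1 - i < ((PySem.List.pyGetD x i []).length : Int)
                then [PySem.List.pyGetD (PySem.List.pyGetD x i []) ((x.length : Int) - 1 - i) 0] else []) := by
    intro acc i _
    have hp : (fun j : Int => i + j == (x.length : Int) - 1) = (fun j : Int => j == (x.length : Int) - 1 - i) := by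
      funext j
      by_cases h : i + j = (x.length : Int) - 1
      · have h2 : j = (x.length : Int) - 1 - i := by omega
        simp [h2]
      · have h2 : j ≠ (x.length : Int) - 1 - i := by omega
        rw [beq_eq_false_iff_ne.mpr h, beq_eq_false_iff_ne.mpr h2]
    calc (PySem.List.pyRange 0 ((PySem.List.pyGetD x i []).length : Int) 1).foldl (fun acc2 j =>
          if i + j == (x.length : Int) - 1 then acc2 ++ [PySem.List.pyGetD (PySem.List.pyGetD x i []) j 0] else acc2) acc
        = acc ++ ((PySem.List.pyRange 0 ((PySem.List.pyGetD x i []).length : Int) 1).filter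
            (fun j : Int => i + j == (x.length : Int) - 1)).map (fun j => PySem.List.pyGetD (PySem.List.pyGetD x i []) j 0) :=
          PySem.List.foldl_append_if _ _ _ _
      _ = _ := by rw [hp, pv_filter_range_eq]; split <;> simp
  rw [PySem.List.foldl_congr_mem _ _ _ _ hstep, PySem.List.foldl_append_eq_flatMap, List.nil_append,
      PySem.List.pyRange_one]
  simp only [Int.sub_zero, Int.toNat_natCast, List.flatMap_map]
  unfold pvCanonC
  rw [List.flatMap_def, List.flatMap_def]
  apply congrArg List.flatten
  apply List.map_congr_left
  intro k hk
  rw [List.mem_range] at hk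
  have hcast : (x.length : Int) - 1 - (0 + (k : Int)) = ((x.length - 1 - k : Nat) : Int) := by omega
  rw [zero_add] at hcast ⊢
  rw [hcast]
  simp [PySem.List.pyGetD_natCast]

-- enumerate+filterMap over the rows is a flatMap over row indices
lemma pv_enum_filterMap {β : Type} (x : List (List Int)) (f : Int × List Int → Option β) (s : Nat) :
    (PySem.List.enumerate x (s : Int)).filterMap f
    = (List.range x.length).flatMap (fun k => (f (((s + k : Nat) : Int), x.getD k [])).toList) := by
  induction x generalizing s with
  | nil => simp [PySem.List.enumerate]
  | cons r rs ih =>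
    have hS : (s : Int) + 1 = ((s + 1 : Nat) : Int) := by push_cast; ring
    have hR : List.range (r :: rs).length = 0 :: (List.range rs.length).map Nat.succ := by
      simp [List.range_succ_eq_map]
    rw [PySem.List.enumerate_cons, List.filterMap_cons, hS, ih (s + 1), hR, List.flatMap_cons,
        List.flatMap_map]
    have hfm : (List.range rs.length).flatMap (fun k => (f ((((s + 1) + k : Nat) : Int), rs.getD k [])).toList)
             = (List.range rs.length).flatMap (fun a => (f (((s + Nat.succ a : Nat) : Int), (r :: rs).getD (Nat.succ a) [])).toList) := by
      rw [List.flatMap_def, List.flatMap_def]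
      refine congrArg List.flatten (List.map_congr_left ?_)
      intro k _
      have hidx : s + 1 + k = s + Nat.succ k := by omega
      rw [hidx]
      rfl
    rw [← hfm]
    cases hf : f ((s : Int), r) <;> simp [hf]

-- B's y comprehension computes the canonical main diagonal
lemma pyB_y_eq (x : List (List Int)) : pyB_y x = pvCanonY x := by
  unfold pyB_y
  have h0 : (0 : Int) = ((0 : Nat) : Int) := rfl
  rw [h0, pv_enum_filterMap]
  unfold pvCanonY
  rw [List.flatMap_def, List.flatMap_def]
  apply congrArg List.flatten
  apply List.map_congr_left
  intro k hk
  rw [List.mem_range] at hk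
  simp [PySem.List.pyGetD_natCast, apply_ite Option.toList]

-- B's c comprehension computes the canonical anti-diagonal
lemma pyB_c_eq (x : List (List Int)) : pyB_c x = pvCanonC x := by
  unfold pyB_c
  have h0 : (0 : Int) = ((0 : Nat) : Int) := rfl
  rw [h0, pv_enum_filterMap]
  unfold pvCanonC
  rw [List.flatMap_def, List.flatMap_def]
  apply congrArg List.flatten
  apply List.map_congr_left
  intro k hk
  rw [List.mem_range] at hk
  have hcast : (x.length : Int) - 1 - ((0 + k : Nat) : Int) = ((x.length - 1 - k : Nat) : Int) := by
    push_cast; omega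
  rw [hcast]
  have hnn : (0 : Int) ≤ ((x.length - 1 - k : Nat) : Int) := Int.natCast_nonneg _
  simp [PySem.List.pyGetD_natCast, apply_ite Option.toList, hnn]

-- elementwise ≤ of zipped lists, index-wise
lemma pv_zip_all_iff (y c : List Int) :
    ((y.zip c).all (fun p => decide (p.1 ≤ p.2)) = true)
    ↔ ∀ k, k < y.length → k < c.length → y.getD k 0 ≤ c.getD k 0 := by
  induction y generalizing c with
  | nil => simp
  | cons a ys ih =>
    cases c with
    | nil => simp
    | cons b cs =>
      simp only [List.zip_cons_cons, List.all_cons, Bool.and_eq_true, decide_eq_true_eq, ih cs]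
      constructor
      · rintro ⟨hab, hrest⟩ k hk1 hk2
        cases k with
        | zero => simpa using hab
        | succ m => simpa using hrest m (by simpa using hk1) (by simpa using hk2)
      · intro hall
        refine ⟨by simpa using hall 0 (by simp) (by simp), fun k h1 h2 => ?_⟩
        simpa using hall (k + 1) (by simpa using h1) (by simpa using h2)

-- A's counting loop versus B's length check + zip/all, given len c ≤ len y
lemma pv_final_eq (y c : List Int) (h : c.length ≤ y.length) :
    (if (((PySem.List.pyRange 0 (c.length : Int) 1).foldl (fun cnt i =>
        if PySem.List.pyGetD y i 0 ≤ PySem.List.pyGetD c i 0 then cnt + 1 else cnt) (0 : Int))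
        == (y.length : Int)) then true else false)
    = (decide (y.length = c.length) && (y.zip c).all (fun p => decide (p.1 ≤ p.2))) := by
  rw [PySem.List.foldl_ite_add_one]
  have hKle : (PySem.List.pyRange 0 (c.length : Int) 1).countP
      (fun i => decide (PySem.List.pyGetD y i 0 ≤ PySem.List.pyGetD c i 0)) ≤ c.length := by
    calc _ ≤ (PySem.List.pyRange 0 (c.length : Int) 1).length := List.countP_le_length
      _ = c.length := by rw [PySem.List.length_pyRange_one]; omega
  by_cases hl : y.length = c.length
  · have hiff : ((PySem.List.pyRange 0 (c.length : Int) 1).countP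
        (fun i => decide (PySem.List.pyGetD y i 0 ≤ PySem.List.pyGetD c i 0)) = c.length)
        ↔ ((y.zip c).all (fun p => decide (p.1 ≤ p.2)) = true) := by
      rw [pv_zip_all_iff]
      constructor
      · intro hcnt k hk1 hk2
        have hlen : (PySem.List.pyRange 0 (c.length : Int) 1).length = c.length := by
          rw [PySem.List.length_pyRange_one]; omega
        have := List.countP_eq_length.mp (hcnt.trans hlen.symm)
        have hmem : (k : Int) ∈ PySem.List.pyRange 0 (c.length : Int) 1 := by
          rw [PySem.List.mem_pyRange_one]; omega
        have h2 := this _ hmem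
        rw [decide_eq_true_eq, PySem.List.pyGetD_natCast, PySem.List.pyGetD_natCast] at h2
        exact h2
      · intro hall
        have hlen : (PySem.List.pyRange 0 (c.length : Int) 1).length = c.length := by
          rw [PySem.List.length_pyRange_one]; omega
        have hcount : (PySem.List.pyRange 0 (c.length : Int) 1).countP
            (fun i => decide (PySem.List.pyGetD y i 0 ≤ PySem.List.pyGetD c i 0))
            = (PySem.List.pyRange 0 (c.length : Int) 1).length := by
          apply List.countP_eq_length.mpr
          intro i hmem
          rw [PySem.List.mem_pyRange_one] at hmem
          have hi : i = ((i.toNat : Nat) : Int) := by omega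
          rw [hi, PySem.List.pyGetD_natCast, PySem.List.pyGetD_natCast, decide_eq_true_eq]
          exact hall i.toNat (by omega) (by omega)
        exact hcount.trans hlen
    cases hall : (y.zip c).all (fun p => decide (p.1 ≤ p.2)) with
    | true =>
      have hcnt := hiff.mpr hall
      rw [hcnt]
      simp [hl]
    | false =>
      have hcnt : (PySem.List.pyRange 0 (c.length : Int) 1).countP
          (fun i => decide (PySem.List.pyGetD y i 0 ≤ PySem.List.pyGetD c i 0)) ≠ c.length := by
        intro hc; rw [hiff.mp hc] at hall; exact absurd hall (by simp)
      have hne : ((0 : Int) + ((PySem.List.pyRange 0 (c.length : Int) 1).countP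
          (fun i => decide (PySem.List.pyGetD y i 0 ≤ PySem.List.pyGetD c i 0)) : Int))
          ≠ (y.length : Int) := by omega
      rw [beq_eq_false_iff_ne.mpr hne]
      simp
  · have hlt : c.length < y.length := by omega
    have hne : ((0 : Int) + ((PySem.List.pyRange 0 (c.length : Int) 1).countP
        (fun i => decide (PySem.List.pyGetD y i 0 ≤ PySem.List.pyGetD c i 0)) : Int))
        ≠ (y.length : Int) := by omega
    rw [beq_eq_false_iff_ne.mpr hne]
    simp [hl]

-- ===== VERDICT (by name: the statement is the Claim_ definition above) =====
theorem is_extreme_spec : Claim_equal_is_extreme := by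
  intro x _ hpre
  unfold Spec_is_extreme is_extreme is_extreme_alt
  rw [pyA_y_eq, pyA_c_eq, pyB_y_eq, pyB_c_eq]
  unfold Pre_is_extreme at hpre
  have hlen : (pvCanonC x).length ≤ (pvCanonY x).length := by
    rw [pv_length_canonY, pv_length_canonC]; exact hpre
  exact pv_final_eq _ _ hlen
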